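-- pv_equiv track=rewrite | github.com/Blaok/soda | src/soda/optimization/tcse.py | range_from_middle
-- ===== SOURCE A (Python) =====
-- from typing import (
--     Any,
--     Callable,
--     Dict,
--     FrozenSet,
--     Iterable,
--     Iterator,
--     List,
--     Optional,
--     Sequence,
--     Set,
--     Tuple,
--     Type,
--     Union,
--     overload,
-- )
--
-- def range_from_middle(n: int) -> Iterator[int]:
--   """A range function that yields number from the middle to the sides.
--
--   Args:
--     n: Integer, the upper bound of the range.
--   Yields:
--     Integers, starting from the n / 2 towards 0 and n - 1.
--   """
--   middle = n // 2
--   if n % 2 == 0: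
--     for shift in range(0, middle):
--       yield middle - shift - 1
--       yield middle + shift
--   else:
--     yield middle
--     for shift in range(1, middle + 1):
--       yield middle - shift
--       yield middle + shift
-- ===== SOURCE B (Python) =====
-- def range_from_middle(n: int):
--   """Yield range(n) indices ordered by distance from the middle, left first on ties."""
--   def key(i):
--     d = 2 * i - (n - 1)
--     return 2 * abs(d) + (d > 0)
--   yield from sorted(range(n), key=key)
-- ===== Notes on version B (the rewrite author's own statement) =====
-- stated objective: alternative
-- what changed: Replaces the two-branch generator that interleaves middle-shift/middle+shift pairs with a single stable sort of range(n) keyed by distance from the center (left index first on ties), emitting the whole ordering in one pass.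
-- intended difference: On negative odd n, A's odd branch unconditionally yields middle and returns [n // 2] even though range(n) is empty, while B returns []; the empty list is the intended result for an empty index range. — e.g. on range_from_middle(-1): A returns [-1], B returns []
import Mathlib
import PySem

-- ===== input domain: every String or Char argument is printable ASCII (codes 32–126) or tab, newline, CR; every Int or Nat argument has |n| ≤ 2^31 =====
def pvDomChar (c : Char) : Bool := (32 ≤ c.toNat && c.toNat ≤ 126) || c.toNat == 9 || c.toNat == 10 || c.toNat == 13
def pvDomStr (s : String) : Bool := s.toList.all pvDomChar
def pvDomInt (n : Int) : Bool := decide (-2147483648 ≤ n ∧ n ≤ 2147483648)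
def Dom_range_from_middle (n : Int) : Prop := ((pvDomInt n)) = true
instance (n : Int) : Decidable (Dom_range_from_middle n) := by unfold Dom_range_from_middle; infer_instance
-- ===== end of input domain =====

-- B replaces the two-branch middle±shift interleaving generator by a stable sort of range(n)
-- keyed by distance from the center (left first on ties): an explicit ordering table, 'alternative' objective.


-- ===== PORT A =====
def range_from_middle (n : Int) : List Int :=
  let middle := PySem.Int.floordiv n 2
  if PySem.Int.mod n 2 = 0 then
    (PySem.List.pyRange 0 middle 1).foldl
      (fun acc shift => acc ++ [middle - shift - 1, middle + shift]) []
  else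
    [middle] ++ (PySem.List.pyRange 1 (middle + 1) 1).foldl
      (fun acc shift => acc ++ [middle - shift, middle + shift]) []

-- ===== PORT B =====
-- B's key: twice the distance of i from the center of range(n), +1 for the right side
def rfmKey (n i : Int) : Int :=
  2 * |2 * i - (n - 1)| + (if 0 < 2 * i - (n - 1) then 1 else 0)

def range_from_middle_alt (n : Int) : List Int :=
  PySem.List.sorted (PySem.List.pyRange 0 n 1) (rfmKey n) false

-- ===== PRECONDITION & SPEC =====
-- On negative odd n, A returns [n // 2] (its odd branch always yields `middle` even though
-- range(n) is empty), while B returns []: [] is the intended value for an empty index range.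
def D_range_from_middle (n : Int) : Prop := n < 0 ∧ PySem.Int.mod n 2 = 1
instance (n : Int) : Decidable (D_range_from_middle n) := by unfold D_range_from_middle; infer_instance
def Spec_range_from_middle (n : Int) (out : List Int) : Prop :=
  ¬ D_range_from_middle n → out = range_from_middle_alt n
instance (n : Int) (out : List Int) : Decidable (Spec_range_from_middle n out) := by unfold Spec_range_from_middle; infer_instance
def pvDiffWitness_range_from_middle : Int := -1
def pvDiffWitnessOut_range_from_middle : (List Int) × (List Int) := ([-1], [])

-- ===== CLAIM (what is proved, stated in full; the proofs are below) =====
def Claim_unchanged_range_from_middle : Prop := ∀ (n : Int), Dom_range_from_middle n → Spec_range_from_middle n (range_from_middle n)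
def Claim_changed_range_from_middle : Prop := Dom_range_from_middle (pvDiffWitness_range_from_middle) ∧ D_range_from_middle (pvDiffWitness_range_from_middle) ∧ range_from_middle (pvDiffWitness_range_from_middle) = pvDiffWitnessOut_range_from_middle.1 ∧ range_from_middle_alt (pvDiffWitness_range_from_middle) = pvDiffWitnessOut_range_from_middle.2 ∧ pvDiffWitnessOut_range_from_middle.1 ≠ pvDiffWitnessOut_range_from_middle.2
def Claim_exact_range_from_middle : Prop := ∀ (n : Int), Dom_range_from_middle n → D_range_from_middle n → range_from_middle n ≠ range_from_middle_alt n

-- ===== LEMMAS AND PROOFS =====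

-- key values of rfmKey on the elements A emits, even case n = 2*m
theorem rfm_key_E_left (m s : Int) (hs : 0 ≤ s) : rfmKey (2 * m) (m - s - 1) = 4 * s + 2 := by
  unfold rfmKey
  rw [show 2 * (m - s - 1) - (2 * m - 1) = -(2 * s + 1) by ring, abs_neg,
    abs_of_nonneg (by omega), if_neg (by omega)]
  ring

theorem rfm_key_E_right (m s : Int) (hs : 0 ≤ s) : rfmKey (2 * m) (m + s) = 4 * s + 3 := by
  unfold rfmKey
  rw [show 2 * (m + s) - (2 * m - 1) = 2 * s + 1 by ring, abs_of_nonneg (by omega),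
    if_pos (by omega)]
  ring

-- key values of rfmKey on the elements A emits, odd case n = 2*m + 1
theorem rfm_key_O_left (m s : Int) (hs : 0 ≤ s) : rfmKey (2 * m + 1) (m - s) = 4 * s := by
  unfold rfmKey
  rw [show 2 * (m - s) - (2 * m + 1 - 1) = -(2 * s) by ring, abs_neg,
    abs_of_nonneg (by omega), if_neg (by omega)]
  ring

theorem rfm_key_O_right (m s : Int) (hs : 1 ≤ s) : rfmKey (2 * m + 1) (m + s) = 4 * s + 1 := by
  unfold rfmKey
  rw [show 2 * (m + s) - (2 * m + 1 - 1) = 2 * s by ring, abs_of_nonneg (by omega),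
    if_pos (by omega)]
  ring

-- A's even-branch output as a flatMap, parametrised by the number of shifts
def rfmG (m : Int) (k : Nat) : List Int :=
  (PySem.List.pyRange 0 (k : Int) 1).flatMap (fun s => [m - s - 1, m + s])

-- A's odd-branch loop output as a flatMap, parametrised by the number of shifts
def rfmH (m : Int) (k : Nat) : List Int :=
  (PySem.List.pyRange 1 ((k : Int) + 1) 1).flatMap (fun s => [m - s, m + s])

theorem rfmG_zero (m : Int) : rfmG m 0 = [] := by
  unfold rfmG
  rw [show ((0 : Nat) : Int) = 0 from rfl, PySem.List.pyRange_one_eq_nil le_rfl]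
  rfl

theorem rfmH_zero (m : Int) : rfmH m 0 = [] := by
  unfold rfmH
  rw [show ((0 : Nat) : Int) + 1 = 1 by norm_num, PySem.List.pyRange_one_eq_nil le_rfl]
  rfl

theorem rfmG_succ (m : Int) (k : Nat) :
    rfmG m (k + 1) = rfmG m k ++ [m - k - 1, m + k] := by
  unfold rfmG
  rw [show (((k + 1 : Nat)) : Int) = (k : Int) + 1 by push_cast; ring,
    PySem.List.pyRange_one_succ_right (Int.natCast_nonneg k), List.flatMap_append]
  simp

theorem rfmH_succ (m : Int) (k : Nat) :
    rfmH m (k + 1) = rfmH m k ++ [m - ((k : Int) + 1), m + ((k : Int) + 1)] := by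
  unfold rfmH
  rw [show (((k + 1 : Nat)) : Int) + 1 = ((k : Int) + 1) + 1 by push_cast; ring,
    PySem.List.pyRange_one_succ_right (by omega), List.flatMap_append]
  simp

theorem rfmG_key_lt (m : Int) (k : Nat) :
    ∀ x ∈ rfmG m k, rfmKey (2 * m) x < 4 * (k : Int) + 2 := by
  intro x hx
  unfold rfmG at hx
  rw [List.mem_flatMap] at hx
  obtain ⟨s, hs, hxs⟩ := hx
  rw [PySem.List.mem_pyRange_one] at hs
  simp only [List.mem_cons, List.not_mem_nil, or_false] at hxs
  rcases hxs with h | h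
  · rw [h, rfm_key_E_left m s hs.1]; omega
  · rw [h, rfm_key_E_right m s hs.1]; omega

theorem rfmH_key_bounds (m : Int) (k : Nat) :
    ∀ x ∈ rfmH m k, 0 < rfmKey (2 * m + 1) x ∧ rfmKey (2 * m + 1) x < 4 * (k : Int) + 4 := by
  intro x hx
  unfold rfmH at hx
  rw [List.mem_flatMap] at hx
  obtain ⟨s, hs, hxs⟩ := hx
  rw [PySem.List.mem_pyRange_one] at hs
  simp only [List.mem_cons, List.not_mem_nil, or_false] at hxs
  rcases hxs with h | h
  · rw [h, rfm_key_O_left m s (by omega)]; omega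
  · rw [h, rfm_key_O_right m s hs.1]; omega

theorem rfmG_pairwise (m : Int) (k : Nat) :
    (rfmG m k).Pairwise (fun a b => rfmKey (2 * m) a < rfmKey (2 * m) b) := by
  induction k with
  | zero => rw [rfmG_zero]; exact List.Pairwise.nil
  | succ k ih =>
    rw [rfmG_succ]
    refine List.pairwise_append.mpr ⟨ih, ?_, ?_⟩
    · simp only [List.pairwise_cons, List.mem_singleton, List.Pairwise.nil, and_true,
        List.not_mem_nil, false_implies, implies_true]
      intro y hy
      rw [hy, rfm_key_E_left m k (Int.natCast_nonneg k),
        rfm_key_E_right m k (Int.natCast_nonneg k)]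
      omega
    · intro x hx y hy
      have hb := rfmG_key_lt m k x hx
      simp only [List.mem_cons, List.not_mem_nil, or_false] at hy
      rcases hy with h | h
      · rw [h, rfm_key_E_left m k (Int.natCast_nonneg k)]; omega
      · rw [h, rfm_key_E_right m k (Int.natCast_nonneg k)]; omega

theorem rfmH_pairwise (m : Int) (k : Nat) :
    (m :: rfmH m k).Pairwise (fun a b => rfmKey (2 * m + 1) a < rfmKey (2 * m + 1) b) := by
  induction k with
  | zero =>
    rw [rfmH_zero]
    exact List.pairwise_singleton _ _
  | succ k ih =>
    rw [rfmH_succ]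
    rcases List.pairwise_cons.mp ih with ⟨ihead, iH⟩
    refine List.pairwise_cons.mpr ⟨?_, ?_⟩
    · intro y hy
      rw [List.mem_append] at hy
      rcases hy with h | h
      · exact ihead y h
      · have hm0 : rfmKey (2 * m + 1) m = 0 := by
          have := rfm_key_O_left m 0 le_rfl
          simpa using this
        simp only [List.mem_cons, List.not_mem_nil, or_false] at h
        rcases h with h | h
        · rw [h, hm0, rfm_key_O_left m ((k : Int) + 1) (by omega)]; omega
        · rw [h, hm0, rfm_key_O_right m ((k : Int) + 1) (by omega)]; omega
    · refine List.pairwise_append.mpr ⟨iH, ?_, ?_⟩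
      · simp only [List.pairwise_cons, List.mem_singleton, List.Pairwise.nil, and_true,
          List.not_mem_nil, false_implies, implies_true]
        intro y hy
        rw [hy, rfm_key_O_left m ((k : Int) + 1) (by omega),
          rfm_key_O_right m ((k : Int) + 1) (by omega)]
        omega
      · intro x hx y hy
        have hb := (rfmH_key_bounds m k x hx).2
        simp only [List.mem_cons, List.not_mem_nil, or_false] at hy
        rcases hy with h | h
        · rw [h, rfm_key_O_left m ((k : Int) + 1) (by omega)]; omega
        · rw [h, rfm_key_O_right m ((k : Int) + 1) (by omega)]; omega

-- appending two elements is, up to permutation, prepending the first and appending the second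
theorem rfm_perm_append_two (xs : List Int) (a b : Int) :
    (xs ++ [a, b]).Perm (a :: (xs ++ [b])) := by
  have h1 : xs ++ [a, b] = (xs ++ [a]) ++ [b] := by simp
  have h2 : (a :: xs) ++ [b] = a :: (xs ++ [b]) := by simp
  rw [h1, ← h2]
  exact (List.perm_append_comm (l₁ := xs) (l₂ := [a])).append_right [b]

theorem rfmG_perm (m : Int) (k : Nat) (hk : (k : Int) ≤ m) :
    (rfmG m k).Perm (PySem.List.pyRange (m - k) (m + k) 1) := by
  induction k with
  | zero =>
    rw [rfmG_zero, show m - ((0 : Nat) : Int) = m by norm_num,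
      show m + ((0 : Nat) : Int) = m by norm_num, PySem.List.pyRange_one_eq_nil le_rfl]
  | succ k ih =>
    have hk' : (k : Int) ≤ m := by push_cast at hk ⊢; omega
    rw [rfmG_succ, show m - ((k + 1 : Nat) : Int) = (m - k - 1) by push_cast; ring,
      show m + ((k + 1 : Nat) : Int) = (m + k) + 1 by push_cast; ring,
      PySem.List.pyRange_one_cons (by omega), show m - (k : Int) - 1 + 1 = m - k by ring,
      PySem.List.pyRange_one_succ_right (by omega)]
    exact (rfm_perm_append_two _ _ _).trans (((ih hk').append_right [m + k]).cons _)

theorem rfmH_perm (m : Int) (k : Nat) (hk : (k : Int) ≤ m) :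
    (m :: rfmH m k).Perm (PySem.List.pyRange (m - k) (m + k + 1) 1) := by
  induction k with
  | zero =>
    rw [rfmH_zero, show m - ((0 : Nat) : Int) = m by norm_num,
      show m + ((0 : Nat) : Int) + 1 = m + 1 by norm_num, PySem.List.pyRange_one_singleton]
  | succ k ih =>
    have hk' : (k : Int) ≤ m := by push_cast at hk ⊢; omega
    rw [rfmH_succ, show m - ((k + 1 : Nat) : Int) = (m - k - 1) by push_cast; ring,
      show m + ((k + 1 : Nat) : Int) + 1 = (m + k + 1) + 1 by push_cast; ring,
      PySem.List.pyRange_one_cons (by omega), show m - (k : Int) - 1 + 1 = m - k by ring,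
      PySem.List.pyRange_one_succ_right (by omega),
      show (m :: (rfmH m k ++ [m - ((k : Int) + 1), m + ((k : Int) + 1)])) =
        (m :: rfmH m k) ++ [m - (k : Int) - 1, m + (k : Int) + 1] by simp; constructor <;> ring]
    exact (rfm_perm_append_two _ _ _).trans
      (((ih hk').append_right [m + (k : Int) + 1]).cons _)

theorem range_from_middle_spec : Claim_unchanged_range_from_middle := by
  intro n _ hD
  have hn := PySem.Int.floordiv_mul_add_mod n 2
  simp only [range_from_middle, range_from_middle_alt]
  set m := PySem.Int.floordiv n 2 with hm
  rcases PySem.Int.mod_two_eq n with h0 | h1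
  · -- even: n = 2 * m
    have hn2 : n = 2 * m := by omega
    rw [if_pos h0]
    by_cases hm0 : m ≤ 0
    · rw [PySem.List.pyRange_one_eq_nil hm0, PySem.List.pyRange_one_eq_nil
        (show n ≤ 0 by omega)]
      exact ((PySem.List.sorted_eq_nil_iff _ _ _).mpr rfl).symm
    · set k := m.toNat with hkdef
      have hk : (k : Int) = m := Int.toNat_of_nonneg (by omega)
      have hfold : (PySem.List.pyRange 0 m 1).foldl
          (fun acc shift => acc ++ [m - shift - 1, m + shift]) [] = rfmG m k := by
        rw [PySem.List.foldl_append_eq_flatMap]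
        unfold rfmG
        rw [hk]
        rfl
      have hperm := rfmG_perm m k (le_of_eq hk)
      rw [hk, show m - m = 0 by ring, show m + m = 2 * m by ring] at hperm
      rw [hfold, hn2]
      exact (PySem.List.sorted_eq_of_perm_of_pairwise_lt _ _ _ hperm (rfmG_pairwise m k)).symm
  · -- odd: n = 2 * m + 1; outside D_ this forces 0 ≤ n, hence 0 ≤ m
    have hn2 : n = 2 * m + 1 := by omega
    have hnneg : 0 ≤ n := by
      by_contra hc
      exact hD ⟨by omega, h1⟩
    have hm0 : 0 ≤ m := by omega
    rw [if_neg (by rw [h1]; norm_num)]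
    set k := m.toNat with hkdef
    have hk : (k : Int) = m := Int.toNat_of_nonneg hm0
    have hfold : (PySem.List.pyRange 1 (m + 1) 1).foldl
        (fun acc shift => acc ++ [m - shift, m + shift]) [] = rfmH m k := by
      rw [PySem.List.foldl_append_eq_flatMap]
      unfold rfmH
      rw [hk]
      rfl
    have hperm := rfmH_perm m k (le_of_eq hk)
    rw [hk, show m - m = 0 by ring, show m + m + 1 = 2 * m + 1 by ring] at hperm
    rw [hfold, hn2, List.singleton_append]
    exact (PySem.List.sorted_eq_of_perm_of_pairwise_lt _ _ _ hperm (rfmH_pairwise m k)).symm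

theorem range_from_middle_changed : Claim_changed_range_from_middle := by
  unfold Claim_changed_range_from_middle; decide

theorem range_from_middle_tight : Claim_exact_range_from_middle := by
  intro n _ hD
  obtain ⟨hneg, hmod⟩ := hD
  have hn := PySem.Int.floordiv_mul_add_mod n 2
  simp only [range_from_middle, range_from_middle_alt]
  set m := PySem.Int.floordiv n 2 with hm
  rw [if_neg (by rw [hmod]; norm_num),
    PySem.List.pyRange_one_eq_nil (show m + 1 ≤ 1 by omega),
    PySem.List.pyRange_one_eq_nil (show n ≤ 0 by omega)]
  rw [(PySem.List.sorted_eq_nil_iff _ _ _).mpr rfl]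
  simp
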